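-- pv_equiv track=rewrite | github.com/crhmhealey/2018_ClassDemos | c block demos/factorial.py | crazy_eights
-- ===== SOURCE A (Python) =====
-- def crazy_eights(n):
-- 	if n is 0:
-- 		return 0
-- 	if n%10 == 8:
-- 		if n%100 == 88:
-- 			return 2 + crazy_eights(n//10)
-- 		return 1 + crazy_eights(n//10)
-- 	return crazy_eights(n//10)
-- ===== SOURCE B (Python) =====
-- def crazy_eights(n):
--     # Extract digits (least-significant first), then count in two passes:
--     # each 8 scores 1, each adjacent pair of 8s scores 1 more.
--     digits = []
--     while n != 0:
--         digits.append(n % 10)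
--         n //= 10
--     count = digits.count(8)
--     for a, b in zip(digits, digits[1:]):
--         if a == 8 and b == 8:
--             count += 1
--     return count
-- ===== Notes on version B (the rewrite author's own statement) =====
-- stated objective: alternative
-- what changed: B first materialises the digit list with an iterative loop and then scores it in two separate passes (count of 8s plus a zip-scan for adjacent 8-pairs), instead of A's direct recursion that folds the pair bonus into each step via n%100.
import Mathlib
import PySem

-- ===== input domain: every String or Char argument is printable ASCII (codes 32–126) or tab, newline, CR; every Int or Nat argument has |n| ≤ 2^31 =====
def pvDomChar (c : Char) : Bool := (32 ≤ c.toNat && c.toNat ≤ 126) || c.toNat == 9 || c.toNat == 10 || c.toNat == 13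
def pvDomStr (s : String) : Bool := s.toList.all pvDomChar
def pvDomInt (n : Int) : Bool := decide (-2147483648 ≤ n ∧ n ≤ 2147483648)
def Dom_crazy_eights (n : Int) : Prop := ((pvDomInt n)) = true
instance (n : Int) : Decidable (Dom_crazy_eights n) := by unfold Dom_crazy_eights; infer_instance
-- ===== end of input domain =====

-- B first builds the digit list, then scores it in two passes; same value as A on all n ≥ 0.

-- ===== PORT A =====
-- A's recursion, with fuel (n.toNat + 1 steps always suffice for n ≥ 0; the fuel
-- guard only makes the recursion total, it never fires inside Pre_).
def crazyA : Nat → Int → Int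
  | 0, _ => 0
  | fuel + 1, n =>
    if n = 0 then 0
    else if PySem.Int.mod n 10 = 8 then
      if PySem.Int.mod n 100 = 88 then 2 + crazyA fuel (PySem.Int.floordiv n 10)
      else 1 + crazyA fuel (PySem.Int.floordiv n 10)
    else crazyA fuel (PySem.Int.floordiv n 10)

def crazy_eights (n : Int) : Int := crazyA (n.toNat + 1) n

-- ===== PORT B =====
-- the while loop collecting digits, least-significant first (fuel as above)
def digitsB : Nat → Int → List Int
  | 0, _ => []
  | fuel + 1, n =>
    if n = 0 then []
    else PySem.Int.mod n 10 :: digitsB fuel (PySem.Int.floordiv n 10)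

-- digits.count(8) plus the zip(digits, digits[1:]) scan for adjacent pairs of 8s
def scoreB (ds : List Int) : Int :=
  (ds.count 8 : Int) + ((ds.zip ds.tail).countP (fun p => p.1 == 8 && p.2 == 8) : Int)

def crazy_eights_alt (n : Int) : Int := scoreB (digitsB (n.toNat + 1) n)

-- ===== PRECONDITION & SPEC =====
-- A infinite-recurses (RecursionError) on negative n; B's while loop also never terminates there.
def Pre_crazy_eights (n : Int) : Prop := 0 ≤ n
instance (n : Int) : Decidable (Pre_crazy_eights n) := by unfold Pre_crazy_eights; infer_instance
def pvWitness_crazy_eights : Int := (88)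

def Spec_crazy_eights (n : Int) (out : Int) : Prop := out = crazy_eights_alt n
instance (n : Int) (out : Int) : Decidable (Spec_crazy_eights n out) := by unfold Spec_crazy_eights; infer_instance

-- ===== CLAIM (what is proved, stated in full; the proofs are below) =====
def Claim_equal_crazy_eights : Prop := ∀ (n : Int), Dom_crazy_eights n → Pre_crazy_eights n → Spec_crazy_eights n (crazy_eights n)

-- ===== LEMMAS AND PROOFS =====

theorem scoreB_cons (d : Int) (L : List Int) :
    scoreB (d :: L) =
      (if d = 8 then 1 else 0) + (if d = 8 ∧ L.head? = some 8 then 1 else 0) + scoreB L := by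
  cases L with
  | nil =>
    simp only [scoreB, List.tail_nil, List.zip_nil_right, List.countP_nil, List.count_nil,
      List.count_cons, List.head?_nil]
    split_ifs with h1 h2 <;> simp_all
  | cons e L' =>
    simp only [scoreB, List.tail_cons, List.zip_cons_cons, List.countP_cons, List.count_cons]
    by_cases hd : d = 8 <;> by_cases he : e = 8 <;>
      simp [hd, he] <;> push_cast <;> ring

theorem digitsB_head? (fuel : Nat) (m : Int) :
    (digitsB fuel m).head? = if fuel = 0 ∨ m = 0 then none else some (PySem.Int.mod m 10) := by
  cases fuel with
  | zero => simp [digitsB]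
  | succ f =>
    by_cases hm : m = 0 <;> simp [digitsB, hm]

theorem crazyA_eq_scoreB (fuel : Nat) (n : Int) (h0 : 0 ≤ n) (hf : n.toNat < fuel) :
    crazyA fuel n = scoreB (digitsB fuel n) := by
  induction fuel generalizing n with
  | zero => omega
  | succ f ih =>
    by_cases hn : n = 0
    · simp [crazyA, digitsB, scoreB, hn]
    · have hmod10 : PySem.Int.mod n 10 = n % 10 := PySem.Int.mod_eq_emod_of_pos (by omega)
      have hmod100 : PySem.Int.mod n 100 = n % 100 := PySem.Int.mod_eq_emod_of_pos (by omega)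
      have hdiv : PySem.Int.floordiv n 10 = n / 10 := PySem.Int.floordiv_eq_ediv_of_pos (by omega)
      have hm0 : 0 ≤ n / 10 := by omega
      have hmlt : (n / 10).toNat < f := by omega
      have ihm := ih (n / 10) hm0 hmlt
      have hhead := digitsB_head? f (n / 10)
      simp only [crazyA, digitsB, hn, hmod10, hmod100, hdiv, if_false, scoreB_cons, ihm]
      have h88 : n % 100 = 88 ↔ n % 10 = 8 ∧ (n / 10) % 10 = 8 := by omega
      by_cases hq : n / 10 = 0
      · -- single remaining digit: no pair possible, and n % 100 = n % 10 ≠ 88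
        have hsmall : n < 10 := by omega
        rw [hhead]
        simp only [hq, or_true, if_true]
        by_cases h8 : n % 10 = 8 <;> simp [h8] <;> omega
      · have hfne : ¬ (f = 0 ∨ n / 10 = 0) := by omega
        rw [hhead, if_neg hfne, PySem.Int.mod_eq_emod_of_pos (by omega)]
        simp only [Option.some.injEq]
        generalize scoreB (digitsB f (n / 10)) = s
        split_ifs <;> omega

-- ===== VERDICT (by name: the statement is the Claim_ definition above) =====
theorem crazy_eights_spec : Claim_equal_crazy_eights := by
  intro n _ hpre
  show crazy_eights n = crazy_eights_alt n
  exact crazyA_eq_scoreB (n.toNat + 1) n hpre (by omega)
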